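-- pv_equiv track=rewrite | github.com/navkant/ds_algo_day_wise | day_13_string_manipulation/string_operations.py | string_operations
-- ===== SOURCE A (Python) =====
-- def string_operations(A: str) -> str:
--     result = ''
--
--     for i in range(len(A)):
--         if 65 <= ord(A[i]) <= 90:
--             pass
--         elif A[i] in ['a', 'e', 'i', 'o', 'u']:
--             result = result + '#'
--         else:
--             result = result + A[i]
--
--     return result * 2
-- ===== SOURCE B (Python) =====
-- def string_operations(A: str) -> str:
--     s = A
--     for code in range(65, 91):
--         s = s.replace(chr(code), '')
--     for v in 'aeiou':
--         s = s.replace(v, '#')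
--     return s * 2
-- ===== Notes on version B (the rewrite author's own statement) =====
-- stated objective: alternative
-- what changed: Replaces A's single index loop with per-character if/elif dispatch and quadratic string concatenation by staged whole-string passes: 26 str.replace passes deleting each uppercase letter, then 5 str.replace passes substituting each lowercase vowel, then doubling; correct because the replacement strings are never themselves uppercase or vowels, so the passes are independent.
import Mathlib
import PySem

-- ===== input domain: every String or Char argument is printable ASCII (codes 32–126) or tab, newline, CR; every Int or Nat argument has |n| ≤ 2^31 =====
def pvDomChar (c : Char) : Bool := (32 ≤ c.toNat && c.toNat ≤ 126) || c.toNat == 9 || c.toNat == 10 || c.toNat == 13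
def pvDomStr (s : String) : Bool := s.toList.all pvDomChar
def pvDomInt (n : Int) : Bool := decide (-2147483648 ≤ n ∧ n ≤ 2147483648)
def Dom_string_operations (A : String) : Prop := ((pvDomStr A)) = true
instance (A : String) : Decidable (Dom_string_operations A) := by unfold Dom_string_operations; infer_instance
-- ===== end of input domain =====

-- B replaces A's single index loop with per-character dispatch by staged whole-string
-- str.replace passes (26 uppercase deletions, then 5 vowel→'#' substitutions), then doubling
-- (objective: alternative decomposition; measured faster — A re-concatenates the result string).

-- ===== PORT A =====
-- the loop body: skip uppercase, '#' for a lowercase vowel, else keep the character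
def pvStepA (r : List Char) (c : Char) : List Char :=
  if 65 ≤ c.toNat ∧ c.toNat ≤ 90 then r
  else if c ∈ ['a', 'e', 'i', 'o', 'u'] then r ++ ['#']
  else r ++ [c]

def string_operations (A : String) : String :=
  let cs := A.toList
  let result := (PySem.List.pyRange 0 (cs.length : Int) 1).foldl
    (fun r i => pvStepA r (PySem.List.pyGetD cs i ' ')) []
  String.ofList (result ++ result)

-- ===== PORT B =====
-- for code in range(65, 91): s = s.replace(chr(code), '')
-- for v in 'aeiou':          s = s.replace(v, '#')
-- return s * 2
def string_operations_alt (A : String) : String :=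
  let s1 := (PySem.List.pyRange 65 91 1).foldl
    (fun s code => PySem.Chars.replace s [Char.ofNat code.toNat] []) A.toList
  let s2 := ("aeiou".toList).foldl (fun s v => PySem.Chars.replace s [v] ['#']) s1
  String.ofList (s2 ++ s2)

-- ===== PRECONDITION & SPEC =====
def Spec_string_operations (A : String) (out : String) : Prop := out = string_operations_alt A
instance (A : String) (out : String) : Decidable (Spec_string_operations A out) := by unfold Spec_string_operations; infer_instance

-- ===== CLAIM (what is proved, stated in full; the proofs are below) =====
def Claim_equal_string_operations : Prop := ∀ (A : String), Dom_string_operations A → Spec_string_operations A (string_operations A)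

-- ===== LEMMAS AND PROOFS =====

-- single-character substitution: what one s.replace(old, new) pass does per character
def pvSub (v : Char) (r : List Char) (c : Char) : List Char := if c = v then r else [c]

-- Chars.replace with a single-character pattern is flatMap of the per-character substitution
lemma pv_go_single (v : Char) (r : List Char) :
    ∀ (l : List Char) (fuel : Nat) (acc : List Char), l.length ≤ fuel →
      PySem.Chars.replace.go [v] r fuel l acc = acc.reverse ++ l.flatMap (pvSub v r) := by
  intro l
  induction l with
  | nil => intro fuel acc h; cases fuel <;> simp [PySem.Chars.replace.go]
  | cons c t ih =>
    intro fuel acc h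
    cases fuel with
    | zero => simp at h
    | succ n =>
      rw [PySem.Chars.replace.go]
      have hpre : [v].isPrefixOf (c :: t) = (v == c) := by simp [List.isPrefixOf]
      rw [hpre]
      simp only [List.length_cons, Nat.succ_le_succ_iff] at h
      by_cases hc : v = c
      · subst hc
        simp [ih n _ h, pvSub]
      · simp [hc, ih n _ h, pvSub, Ne.symm hc]

lemma pv_replace_single (v : Char) (r : List Char) (cs : List Char) :
    PySem.Chars.replace cs [v] r = cs.flatMap (pvSub v r) := by
  rw [PySem.Chars.replace]
  simp [pv_go_single v r cs cs.length [] (le_refl _)]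

-- a sequence of per-character passes over a flatMap distributes to each character
lemma pv_foldl_flatMap {α : Type} (F : α → Char → List Char) :
    ∀ (ops : List α) (cs : List Char) (h : Char → List Char),
      ops.foldl (fun s op => s.flatMap (F op)) (cs.flatMap h) =
        cs.flatMap (fun c => ops.foldl (fun s op => s.flatMap (F op)) (h c)) := by
  intro ops
  induction ops with
  | nil => intro cs h; simp
  | cons op ops ih =>
    intro cs h
    rw [List.foldl_cons, List.flatMap_assoc, ih cs]
    simp

-- deletion passes leave the empty string empty
lemma pv_del_fold_nil (us : List Char) :
    us.foldl (fun s u => s.flatMap (pvSub u [])) [] = [] := by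
  induction us with
  | nil => rfl
  | cons u us ih => simpa using ih

-- the 26 deletion passes on one character: delete it iff it occurs in the pass list
lemma pv_del_fold (us : List Char) (c : Char) :
    us.foldl (fun s u => s.flatMap (pvSub u [])) [c] =
      if c ∈ us then [] else [c] := by
  induction us with
  | nil => simp
  | cons u us ih =>
    by_cases hc : c = u
    · subst hc
      simp [pvSub, pv_del_fold_nil]
    · simp only [List.foldl_cons, List.flatMap_cons, List.flatMap_nil, pvSub, if_neg hc,
        List.append_nil, ih, List.mem_cons]
      simp [hc]

-- substitution passes leave ['#'] alone when '#' is not in the pass list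
lemma pv_hash_fold (vs : List Char) (h : '#' ∉ vs) :
    vs.foldl (fun s v => s.flatMap (pvSub v ['#'])) ['#'] = ['#'] := by
  induction vs with
  | nil => rfl
  | cons v vs ih =>
    simp only [List.mem_cons, not_or] at h
    simp only [List.foldl_cons, List.flatMap_cons, List.flatMap_nil, pvSub, if_neg h.1,
      List.append_nil]
    exact ih h.2

-- the vowel passes on one character
lemma pv_vowel_fold (vs : List Char) (c : Char) (h : '#' ∉ vs) :
    vs.foldl (fun s v => s.flatMap (pvSub v ['#'])) [c] =
      if c ∈ vs then ['#'] else [c] := by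
  induction vs with
  | nil => simp
  | cons v vs ih =>
    simp only [List.mem_cons, not_or] at h
    by_cases hc : c = v
    · subst hc
      simp [pvSub, pv_hash_fold vs h.2]
    · simp only [List.foldl_cons, List.flatMap_cons, List.flatMap_nil, pvSub, if_neg hc,
        List.append_nil, ih h.2, List.mem_cons]
      simp [hc]

def pvUppercase : List Char :=
  ['A','B','C','D','E','F','G','H','I','J','K','L','M',
   'N','O','P','Q','R','S','T','U','V','W','X','Y','Z']

lemma pv_char_eq_of_toNat (c : Char) (k : Nat) (h : c.toNat = k) : c = Char.ofNat k := by
  have h2 := Char.ofNat_toNat c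
  rw [h] at h2
  exact h2.symm

lemma pv_mem_uppercase (c : Char) :
    c ∈ pvUppercase ↔ (65 ≤ c.toNat ∧ c.toNat ≤ 90) := by
  constructor
  · intro h
    simp only [pvUppercase, List.mem_cons, List.not_mem_nil, or_false] at h
    rcases h with h|h|h|h|h|h|h|h|h|h|h|h|h|h|h|h|h|h|h|h|h|h|h|h|h|h <;> subst h <;> decide
  · rintro ⟨h1, h2⟩
    generalize hgen : c.toNat = n at h1 h2
    interval_cases n <;> rw [pv_char_eq_of_toNat c _ hgen] <;> decide

-- A's per-character result
def pvStep (c : Char) : List Char :=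
  if 65 ≤ c.toNat ∧ c.toNat ≤ 90 then []
  else if c ∈ ['a', 'e', 'i', 'o', 'u'] then ['#']
  else [c]

lemma pvStepA_eq (r : List Char) (c : Char) : pvStepA r c = r ++ pvStep c := by
  unfold pvStepA pvStep
  split_ifs <;> simp

lemma pv_foldl_stepA (cs : List Char) : ∀ r, cs.foldl pvStepA r = r ++ cs.flatMap pvStep := by
  induction cs with
  | nil => intro r; simp
  | cons c t ih =>
    intro r
    simp [List.foldl_cons, pvStepA_eq, ih, List.flatMap_cons]

-- any sequence of per-character passes leaves the empty string empty
lemma pv_flat_fold_nil (F : Char → Char → List Char) (ops : List Char) :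
    ops.foldl (fun s op => s.flatMap (F op)) [] = [] := by
  induction ops with
  | nil => rfl
  | cons op ops ih => simpa using ih

-- B's whole pipeline, per character, equals A's per-character result
lemma pv_pointwise (c : Char) :
    ("aeiou".toList).foldl (fun s v => s.flatMap (pvSub v ['#']))
      (pvUppercase.foldl (fun s u => s.flatMap (pvSub u [])) [c]) = pvStep c := by
  rw [pv_del_fold, pvStep]
  have hv : ("aeiou".toList) = ['a','e','i','o','u'] := by decide
  by_cases hu : 65 ≤ c.toNat ∧ c.toNat ≤ 90
  · rw [if_pos ((pv_mem_uppercase c).mpr hu), if_pos hu, pv_flat_fold_nil]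
  · rw [if_neg (fun h => hu ((pv_mem_uppercase c).mp h)), if_neg hu, hv,
      pv_vowel_fold _ c (by decide)]

-- B's two replace loops, as a flatMap of the per-character pipeline
lemma pv_B_chain (cs : List Char) :
    ("aeiou".toList).foldl (fun s v => PySem.Chars.replace s [v] ['#'])
      ((PySem.List.pyRange 65 91 1).foldl
        (fun s code => PySem.Chars.replace s [Char.ofNat code.toNat] []) cs)
    = cs.flatMap pvStep := by
  have hrange : PySem.List.pyRange 65 91 1 =
      ([65,66,67,68,69,70,71,72,73,74,75,76,77,78,79,80,81,82,83,84,85,86,87,88,89,90] : List Int) := by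
    decide
  have hmap : pvUppercase =
      ([65,66,67,68,69,70,71,72,73,74,75,76,77,78,79,80,81,82,83,84,85,86,87,88,89,90] : List Int).map
        (fun code => Char.ofNat code.toNat) := by decide
  have hup : (PySem.List.pyRange 65 91 1).foldl
      (fun s code => PySem.Chars.replace s [Char.ofNat code.toNat] []) cs
      = pvUppercase.foldl (fun s u => s.flatMap (pvSub u [])) cs := by
    rw [hrange, hmap, List.foldl_map]
    simp only [pv_replace_single]
  have hv : ∀ init, ("aeiou".toList).foldl (fun s v => PySem.Chars.replace s [v] ['#']) init
      = ("aeiou".toList).foldl (fun s v => s.flatMap (pvSub v ['#'])) init := by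
    intro init
    simp only [pv_replace_single]
  have hsing : cs.flatMap (fun c => [c]) = cs := by
    simp
  rw [hup, hv, ← hsing, pv_foldl_flatMap (fun u => pvSub u []) pvUppercase,
    pv_foldl_flatMap (fun v => pvSub v ['#']), hsing]
  exact List.flatMap_congr (fun c _ => pv_pointwise c)

-- ===== VERDICT (by name: the statement is the Claim_ definition above) =====
theorem string_operations_spec : Claim_equal_string_operations := by
  intro A hA
  unfold Spec_string_operations string_operations string_operations_alt
  simp only
  rw [PySem.List.foldl_pyRange_zero_pyGetD' A.toList ' ' pvStepA [],
    pv_foldl_stepA A.toList [], pv_B_chain A.toList]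
  simp
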